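-- pv_equiv track=rewrite | github.com/owenguobadia24s-collab/ovc-infra | tools/audit_interpreter/src/audit_interpreter/pipeline/change_classifier.py | _quote_cmd_arg
-- ===== SOURCE A (Python) =====
-- def _quote_cmd_arg(value: str) -> str:
--     if value == "":
--         return '""'
--     needs_quotes = any(ch.isspace() or ch in "\"'" for ch in value)
--     if not needs_quotes:
--         return value
--     escaped = value.replace("\\", "\\\\").replace('"', '\\"')
--     return f'"{escaped}"'
-- ===== SOURCE B (Python) =====
-- def _quote_cmd_arg(value: str) -> str:
--     if value == "":
--         return '""'
--     parts = []
--     needs_quotes = False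
--     for ch in value:
--         if ch == "\\":
--             parts.append("\\\\")
--         elif ch == '"':
--             parts.append('\\"')
--         else:
--             parts.append(ch)
--         if ch.isspace() or ch == '"' or ch == "'":
--             needs_quotes = True
--     if not needs_quotes:
--         return value
--     return '"' + "".join(parts) + '"'
-- ===== Notes on version B (the rewrite author's own statement) =====
-- stated objective: alternative
-- what changed: Replaces the detection scan plus two whole-string .replace passes with a single character loop that builds the escaped pieces and the needs-quotes flag in one traversal, returning the untouched original when no quoting is needed.
import Mathlib
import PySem

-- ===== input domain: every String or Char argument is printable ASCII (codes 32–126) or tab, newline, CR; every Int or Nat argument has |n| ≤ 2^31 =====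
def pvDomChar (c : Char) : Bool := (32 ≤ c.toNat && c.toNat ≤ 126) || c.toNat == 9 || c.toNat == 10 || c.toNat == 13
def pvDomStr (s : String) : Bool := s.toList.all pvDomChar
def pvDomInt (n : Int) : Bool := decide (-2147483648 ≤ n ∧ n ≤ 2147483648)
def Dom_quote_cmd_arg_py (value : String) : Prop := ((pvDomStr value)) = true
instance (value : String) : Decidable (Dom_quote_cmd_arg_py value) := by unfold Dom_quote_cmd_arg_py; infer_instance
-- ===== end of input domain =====

-- B fuses A's detection scan and two .replace passes into one per-character traversal with an accumulator (alternative decomposition; same cost).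

-- ===== PORT A =====
def quote_cmd_arg_py (value : String) : String :=
  if value == "" then "\"\""
  else
    let needs_quotes := value.toList.any (fun ch => PySem.Chars.isspace ch || PySem.Chars.isIn [ch] ['"', '\''])
    if !needs_quotes then value
    else
      let escaped := PySem.Str.replace (PySem.Str.replace value "\\" "\\\\") "\"" "\\\""
      String.mk ('"' :: escaped.toList ++ ['"'])

-- ===== PORT B =====
def pvEscChar (c : Char) : List Char :=
  if c = '\\' then ['\\', '\\'] else if c = '"' then ['\\', '"'] else [c]

def pvNeedsQ (c : Char) : Bool :=
  PySem.Chars.isspace c || c == '"' || c == '\''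

def quote_cmd_arg_py_alt (value : String) : String :=
  if value == "" then "\"\""
  else
    let st := value.toList.foldl
      (fun (st : List Char × Bool) c => (st.1 ++ pvEscChar c, st.2 || pvNeedsQ c))
      ([], false)
    if st.2 then String.mk ('"' :: st.1 ++ ['"']) else value

-- ===== PRECONDITION & SPEC =====
def Spec_quote_cmd_arg_py (value : String) (out : String) : Prop := out = quote_cmd_arg_py_alt value
instance (value : String) (out : String) : Decidable (Spec_quote_cmd_arg_py value out) := by unfold Spec_quote_cmd_arg_py; infer_instance

-- ===== CLAIM (what is proved, stated in full; the proofs are below) =====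
def Claim_equal_quote_cmd_arg_py : Prop := ∀ (value : String), Dom_quote_cmd_arg_py value → Spec_quote_cmd_arg_py value (quote_cmd_arg_py value)

-- ===== LEMMAS AND PROOFS =====

-- Python's `str.replace` with a single-character pattern is the per-character expansion.
theorem replace_go_single (o : Char) (nn : List Char) :
    ∀ (l acc : List Char),
      PySem.Chars.replace.go [o] nn l.length l acc
        = acc.reverse ++ l.flatMap (fun c => if c = o then nn else [c]) := by
  intro l
  induction l with
  | nil => intro acc; simp [PySem.Chars.replace.go]
  | cons c t ih =>
    intro acc
    rw [List.length_cons, PySem.Chars.replace.go]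
    by_cases h : c = o
    · subst h
      simp only [List.isPrefixOf, BEq.rfl, Bool.true_and, if_pos]
      rw [show List.drop [c].length (c :: t) = t from rfl, ih]
      simp
    · have hp : [o].isPrefixOf (c :: t) = false := by
        simp [List.isPrefixOf]
        exact fun hco => absurd hco.symm h
      rw [hp]
      simp only [Bool.false_eq_true, if_false]
      rw [ih]
      simp [h]

theorem replace_single (o : Char) (nn : List Char) (l : List Char) :
    PySem.Chars.replace l [o] nn = l.flatMap (fun c => if c = o then nn else [c]) := by
  rw [PySem.Chars.replace]
  simp [replace_go_single o nn l]

-- the two chained replaces equal the fused per-character escape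
theorem double_replace_eq (l : List Char) :
    PySem.Chars.replace (PySem.Chars.replace l ['\\'] ['\\', '\\']) ['"'] ['\\', '"']
      = l.flatMap pvEscChar := by
  rw [replace_single, replace_single]
  induction l with
  | nil => simp
  | cons c t ih =>
    simp only [List.flatMap_cons, List.flatMap_append, ih]
    congr 1
    by_cases h1 : c = '\\'
    · subst h1; simp [pvEscChar]
    · by_cases h2 : c = '"' <;> simp [h1, h2, pvEscChar]

-- membership of a single char as a substring is list membership
theorem isIn_singleton (c : Char) (l : List Char) :
    PySem.Chars.isIn [c] l = l.contains c := by
  by_cases h : c ∈ l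
  · have : [c] <:+: l := by
      obtain ⟨s, t, rfl⟩ := List.append_of_mem h
      exact ⟨s, t, by simp⟩
    rw [(PySem.Chars.isIn_iff_infix [c] l).mpr this]
    simp [h]
  · cases hb : PySem.Chars.isIn [c] l with
    | false => simp [h]
    | true => exact absurd (((PySem.Chars.isIn_iff_infix [c] l).mp hb).subset (by simp)) h

-- the fold computes (flatMap of escapes, any of the flag)
theorem foldl_esc (l : List Char) :
    ∀ (acc : List Char) (b : Bool),
      l.foldl (fun (st : List Char × Bool) c => (st.1 ++ pvEscChar c, st.2 || pvNeedsQ c)) (acc, b)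
        = (acc ++ l.flatMap pvEscChar, b || l.any pvNeedsQ) := by
  induction l with
  | nil => intro acc b; simp
  | cons c t ih =>
    intro acc b
    simp only [List.foldl_cons, ih, List.flatMap_cons, List.any_cons]
    simp [Bool.or_assoc]

theorem any_needs_eq (l : List Char) :
    (l.any (fun ch => PySem.Chars.isspace ch || PySem.Chars.isIn [ch] ['"', '\'']))
      = l.any pvNeedsQ := by
  induction l with
  | nil => rfl
  | cons c t ih =>
    rw [List.any_cons, List.any_cons, ih]
    congr 1
    rw [isIn_singleton]
    by_cases h1 : c = '"' <;> by_cases h2 : c = '\'' <;>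
      simp [pvNeedsQ, h1, h2, Bool.or_assoc]

-- ===== VERDICT (by name: the statement is the Claim_ definition above) =====
theorem quote_cmd_arg_py_spec : Claim_equal_quote_cmd_arg_py := by
  intro value _
  unfold Spec_quote_cmd_arg_py quote_cmd_arg_py quote_cmd_arg_py_alt
  by_cases hempty : value == ""
  · simp [hempty]
  · simp only [hempty, Bool.false_eq_true, if_false]
    rw [foldl_esc value.toList [] false, any_needs_eq]
    by_cases hn : value.toList.any pvNeedsQ
    · simp only [hn, Bool.not_true, Bool.false_eq_true, if_false, List.nil_append,
        Bool.false_or, if_true]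
      have : (PySem.Str.replace (PySem.Str.replace value "\\" "\\\\") "\"" "\\\"").toList
          = value.toList.flatMap pvEscChar := by
        rw [PySem.Str.toList_replace, PySem.Str.toList_replace]
        exact double_replace_eq value.toList
      rw [this]
    · simp [hn]
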